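-- pv_equiv track=rewrite | github.com/ghostrider77/BioinformaticsProblems | Python/textbook_track/chapter03/ba3c.py | build_overlap_graph
-- ===== SOURCE A (Python) =====
-- from collections import defaultdict
--
-- def build_overlap_graph(k_mers):
--     def create_prefix_to_pattern_dict():
--         d = defaultdict(list)
--         for k_mer in k_mers:
--             prefix = k_mer[:-1]
--             d[prefix].append(k_mer)
--         return dict(d)
--
--     prefix_to_pattern = create_prefix_to_pattern_dict()
--     graph = defaultdict(list)
--     for k_mer in k_mers:
--         suffix = k_mer[1:]
--         neighbours = prefix_to_pattern.get(suffix, [])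
--         graph[k_mer].extend(neighbours)
--     return dict(graph)
-- ===== SOURCE B (Python) =====
-- def build_overlap_graph(k_mers):
--     graph = {}
--     for km1 in k_mers:
--         matches = [km2 for km2 in k_mers if km1[1:] == km2[:-1]]
--         graph[km1] = graph.get(km1, []) + matches
--     return graph
-- ===== Notes on version B (the rewrite author's own statement) =====
-- stated objective: simpler
-- what changed: Replaces the two-phase prefix-index construction (build a prefix->patterns hash, then look up each suffix) with a single direct all-pairs scan that, for each k-mer, collects every k-mer whose prefix equals its suffix.
import Mathlib
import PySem

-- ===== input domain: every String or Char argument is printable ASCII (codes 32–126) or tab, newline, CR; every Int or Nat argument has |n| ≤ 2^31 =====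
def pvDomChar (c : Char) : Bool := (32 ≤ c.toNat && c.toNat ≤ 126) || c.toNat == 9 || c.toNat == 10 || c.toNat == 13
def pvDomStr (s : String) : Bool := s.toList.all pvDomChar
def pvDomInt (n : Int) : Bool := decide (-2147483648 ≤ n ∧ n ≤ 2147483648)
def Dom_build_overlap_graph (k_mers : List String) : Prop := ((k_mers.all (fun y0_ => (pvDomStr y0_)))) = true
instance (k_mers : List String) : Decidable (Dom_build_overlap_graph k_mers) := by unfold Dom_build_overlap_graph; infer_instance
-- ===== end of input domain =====

-- B replaces A's prefix-index-then-lookup with a direct all-pairs scan; objective: simpler.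

-- ===== PORT A =====
-- k_mer[:-1] and k_mer[1:]
def pvPref (s : String) : String := PySem.Str.slice s none (some (-1))
def pvSuf (s : String) : String := PySem.Str.slice s (some 1) none

def build_overlap_graph (k_mers : List String) : List (String × List String) :=
  -- create_prefix_to_pattern_dict: defaultdict(list), d[k_mer[:-1]].append(k_mer)
  let prefix_to_pattern : PySem.Dict String (List String) :=
    k_mers.foldl (fun d km => d.modify (pvPref km) [] (· ++ [km])) PySem.Dict.empty
  -- graph = defaultdict(list); graph[k_mer].extend(prefix_to_pattern.get(k_mer[1:], []))
  let graph : PySem.Dict String (List String) :=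
    k_mers.foldl (fun g km => g.modify km [] (· ++ prefix_to_pattern.getD (pvSuf km) []))
      PySem.Dict.empty
  graph.items

-- ===== PORT B =====
def build_overlap_graph_alt (k_mers : List String) : List (String × List String) :=
  (k_mers.foldl (fun g km1 =>
      g.insert km1 (g.getD km1 [] ++ k_mers.filter (fun km2 => pvSuf km1 == pvPref km2)))
    PySem.Dict.empty).items

-- ===== PRECONDITION & SPEC =====
def Spec_build_overlap_graph (k_mers : List String) (out : List (String × List String)) : Prop := out = build_overlap_graph_alt k_mers
instance (k_mers : List String) (out : List (String × List String)) : Decidable (Spec_build_overlap_graph k_mers out) := by unfold Spec_build_overlap_graph; infer_instance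

-- ===== CLAIM (what is proved, stated in full; the proofs are below) =====
def Claim_equal_build_overlap_graph : Prop := ∀ (k_mers : List String), Dom_build_overlap_graph k_mers → Spec_build_overlap_graph k_mers (build_overlap_graph k_mers)

-- ===== LEMMAS AND PROOFS =====

-- A's prefix index, looked up at c, is exactly the in-order list of k-mers whose prefix is c.
theorem prefDict_getD (k_mers : List String) (c : String) :
    (k_mers.foldl (fun d km => d.modify (pvPref km) [] (· ++ [km])) PySem.Dict.empty).getD c []
      = k_mers.filter (fun km2 => c == pvPref km2) := by
  have h := PySem.Dict.getD_foldl_modify_append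
    (l := k_mers.map (fun km => (pvPref km, km)))
    (d := (PySem.Dict.empty : PySem.Dict String (List String))) (c := c)
  rw [List.foldl_map] at h
  rw [h]
  simp only [PySem.Dict.getD_empty, List.nil_append, List.filter_map, List.map_map]
  simp only [Function.comp_def, List.map_id_fun', id]
  exact List.filter_congr (fun km2 _ => by simp [BEq.comm])

theorem build_overlap_graph_spec : Claim_equal_build_overlap_graph := by
  intro k_mers _
  show build_overlap_graph k_mers = build_overlap_graph_alt k_mers
  show (k_mers.foldl (fun g km =>
      g.modify km [] (· ++ (k_mers.foldl (fun d km' => d.modify (pvPref km') [] (· ++ [km']))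
        PySem.Dict.empty).getD (pvSuf km) [])) PySem.Dict.empty).items
    = (k_mers.foldl (fun g km1 =>
      g.insert km1 (g.getD km1 [] ++ k_mers.filter (fun km2 => pvSuf km1 == pvPref km2)))
        PySem.Dict.empty).items
  congr 1
  have hstep : (fun (g : PySem.Dict String (List String)) km =>
      g.modify km [] (· ++ (k_mers.foldl (fun d km' => d.modify (pvPref km') [] (· ++ [km']))
        PySem.Dict.empty).getD (pvSuf km) []))
      = fun g km1 => g.insert km1 (g.getD km1 [] ++
          k_mers.filter (fun km2 => pvSuf km1 == pvPref km2)) := by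
    funext g km
    show g.insert km (g.getD km [] ++ _) = _
    rw [prefDict_getD]
  rw [hstep]

-- ===== VERDICT (by name: the statement is the Claim_ definition above) =====
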